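-- pv_equiv track=rewrite | github.com/Awais68/physical-AI-Homanoid-Book | Humainoid-robotics/src/api/translation_middleware.py | validate_language
-- ===== SOURCE A (Python) =====
-- def validate_language(lang: str) -> str:
--     """Validate and normalize language code"""
--     # List of supported languages
--     supported = ['en', 'ur', 'ur-PK', 'ar', 'es', 'fr', 'de', 'zh', 'hi', 'pt', 'ru', 'ja']
--
--     if lang in supported:
--         return lang
--
--     # Try to find partial match
--     for supported_lang in supported:
--         if lang.lower() == supported_lang.lower():
--             return supported_lang
--
--     return "en"
-- ===== SOURCE B (Python) =====
-- def validate_language(lang: str) -> str: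
--     """Validate and normalize language code"""
--     l = lang.lower()
--     if l == "ur-pk":
--         return "ur-PK"
--     return l if l in ("en", "ur", "ar", "es", "fr", "de", "zh", "hi", "pt", "ru", "ja") else "en"
-- ===== Notes on version B (the rewrite author's own statement) =====
-- stated objective: simpler
-- what changed: B keeps no canonical list-to-scan or mapping at all: it lowercases once, special-cases the one code (ur-PK) whose canonical form is not lowercase, and otherwise returns the lowercased input itself when it is one of the eleven all-lowercase codes, else the default English code.
import Mathlib
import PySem

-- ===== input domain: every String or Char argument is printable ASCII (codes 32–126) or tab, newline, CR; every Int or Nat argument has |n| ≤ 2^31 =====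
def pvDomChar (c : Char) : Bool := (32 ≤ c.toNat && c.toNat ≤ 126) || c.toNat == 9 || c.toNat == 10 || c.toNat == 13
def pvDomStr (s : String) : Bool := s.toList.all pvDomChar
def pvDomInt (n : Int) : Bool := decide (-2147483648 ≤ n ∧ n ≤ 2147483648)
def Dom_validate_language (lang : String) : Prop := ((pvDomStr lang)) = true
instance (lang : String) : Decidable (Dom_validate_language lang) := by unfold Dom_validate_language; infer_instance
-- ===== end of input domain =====

-- B drops the canonical list/scan entirely: lower once, special-case the single
-- non-lowercase canonical code 'ur-PK', else return the lowercase input if supported (simpler).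

-- ===== PORT A =====
def supportedA : List String :=
  ["en", "ur", "ur-PK", "ar", "es", "fr", "de", "zh", "hi", "pt", "ru", "ja"]

-- the 'for supported_lang in supported' loop of A
def loopA (lang : String) : List String → String
  | [] => "en"
  | c :: rest => if PySem.Str.lower lang == PySem.Str.lower c then c else loopA lang rest

def validate_language (lang : String) : String :=
  if supportedA.contains lang then lang
  else loopA lang supportedA

-- ===== PORT B =====
def lowersB : List String :=
  ["en", "ur", "ar", "es", "fr", "de", "zh", "hi", "pt", "ru", "ja"]

def validate_language_alt (lang : String) : String :=
  let l := PySem.Str.lower lang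
  if l == "ur-pk" then "ur-PK"
  else if lowersB.contains l then l else "en"

-- ===== PRECONDITION & SPEC =====
def Spec_validate_language (lang : String) (out : String) : Prop := out = validate_language_alt lang
instance (lang : String) (out : String) : Decidable (Spec_validate_language lang out) := by unfold Spec_validate_language; infer_instance

-- ===== CLAIM (what is proved, stated in full; the proofs are below) =====
def Claim_equal_validate_language : Prop := ∀ (lang : String), Dom_validate_language lang → Spec_validate_language lang (validate_language lang)

-- ===== LEMMAS AND PROOFS =====

-- A's loop depends on lang only through lang.lower(); goA is that abstraction
def goA (s : String) : List String → String
  | [] => "en"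
  | c :: rest => if s == PySem.Str.lower c then c else goA s rest

theorem loopA_eq_goA (lang : String) (xs : List String) :
    loopA lang xs = goA (PySem.Str.lower lang) xs := by
  induction xs with
  | nil => rfl
  | cons c rest ih => simp [loopA, goA, ih]

-- both sides as a function of s = lang.lower()
theorem key (s : String) :
    goA s supportedA =
      (if s == "ur-pk" then "ur-PK" else if lowersB.contains s then s else "en") := by
  by_cases h1 : s = "en"; · subst h1; decide
  by_cases h2 : s = "ur"; · subst h2; decide
  by_cases h3 : s = "ur-pk"; · subst h3; decide
  by_cases h4 : s = "ar"; · subst h4; decide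
  by_cases h5 : s = "es"; · subst h5; decide
  by_cases h6 : s = "fr"; · subst h6; decide
  by_cases h7 : s = "de"; · subst h7; decide
  by_cases h8 : s = "zh"; · subst h8; decide
  by_cases h9 : s = "hi"; · subst h9; decide
  by_cases h10 : s = "pt"; · subst h10; decide
  by_cases h11 : s = "ru"; · subst h11; decide
  by_cases h12 : s = "ja"; · subst h12; decide
  have hlow : ∀ c ∈ supportedA, PySem.Str.lower c = if c = "ur-PK" then "ur-pk" else c := by decide
  simp [goA, supportedA, lowersB, hlow,
    h1, h2, h3, h4, h5, h6, h7, h8, h9, h10, h11, h12]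

-- ===== VERDICT (by name: the statement is the Claim_ definition above) =====
theorem validate_language_spec : Claim_equal_validate_language := by
  intro lang _
  unfold Spec_validate_language validate_language validate_language_alt
  by_cases h : supportedA.contains lang
  · rw [if_pos h]
    simp only [supportedA, List.contains_cons, List.contains_nil, Bool.or_eq_true,
      beq_iff_eq] at h
    rcases h with rfl | rfl | rfl | rfl | rfl | rfl | rfl | rfl | rfl | rfl | rfl | rfl | h
    all_goals first | decide | simp at h
  · rw [if_neg h, loopA_eq_goA, key]
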